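-- pv_equiv track=rewrite | github.com/JesseZhuang/InCodeLearning-Python3 | algorithm/jzarray/brightest_position.py | brightest_position
-- ===== SOURCE A (Python) =====
-- from collections import defaultdict
-- from typing import List
--
-- def brightest_position(lights: List[List[int]]) -> int:
--     da = defaultdict(int)  # or use SortedDict
--     for light in lights:
--         l, r = light[0] - light[1], light[0] + light[1]
--         da[l] += 1
--         da[r + 1] -= 1
--     res, b, mx = 0, 0, 0
--     for p in sorted(da):
--         b += da[p]
--         if mx < b:
--             mx = b
--             res = p
--     return res
-- ===== SOURCE B (Python) =====
-- def brightest_position(lights):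
--     starts = sorted(x[0] - x[1] for x in lights)
--     ends = sorted(x[0] + x[1] + 1 for x in lights)
--     n = len(starts)
--     res, b, mx = 0, 0, 0
--     i = j = 0
--     while i < n:
--         if j < n and ends[j] <= starts[i]:
--             b -= 1
--             j += 1
--         else:
--             b += 1
--             if mx < b:
--                 mx = b
--                 res = starts[i]
--             i += 1
--     return res
-- ===== Notes on version B (the rewrite author's own statement) =====
-- stated objective: alternative
-- what changed: Replaces A's defaultdict of coordinate deltas swept over sorted dict keys by two separately sorted start/end arrays walked with a two-pointer merge (ends processed before starts at equal coordinates), maintaining the running coverage directly.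
import Mathlib
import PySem

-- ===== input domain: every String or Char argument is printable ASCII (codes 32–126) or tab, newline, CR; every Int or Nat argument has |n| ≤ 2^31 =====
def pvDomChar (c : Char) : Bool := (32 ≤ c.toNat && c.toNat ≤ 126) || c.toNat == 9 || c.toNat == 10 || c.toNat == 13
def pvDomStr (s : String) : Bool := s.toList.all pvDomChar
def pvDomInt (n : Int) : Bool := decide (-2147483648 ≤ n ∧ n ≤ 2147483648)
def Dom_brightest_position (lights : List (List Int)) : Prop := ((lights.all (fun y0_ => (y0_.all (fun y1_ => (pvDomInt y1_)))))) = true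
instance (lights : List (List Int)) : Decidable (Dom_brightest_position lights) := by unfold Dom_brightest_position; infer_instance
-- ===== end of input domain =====

-- B replaces A's defaultdict-of-deltas sweep over sorted dict keys by a two-pointer merge
-- of two separately sorted start/end arrays (alternative decomposition, similar cost).

-- ===== PORT A =====
-- literal port of A: build a delta dict, then sweep its sorted keys with state (res, b, mx)
def brightest_position (lights : List (List Int)) : Int :=
  let da : PySem.Dict Int Int := lights.foldl (fun da light =>
      let l := PySem.List.pyGetD light 0 0 - PySem.List.pyGetD light 1 0
      let r := PySem.List.pyGetD light 0 0 + PySem.List.pyGetD light 1 0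
      let da := da.modify l 0 (· + 1)
      da.modify (r + 1) 0 (· - 1)) PySem.Dict.empty
  let fin := (PySem.List.sorted da.keys (fun p => p) false).foldl
      (fun (st : Int × Int × Int) p =>
        let b := st.2.1 + da.getD p 0
        if st.2.2 < b then (p, b, b) else (st.1, b, st.2.2)) (0, 0, 0)
  fin.1

-- ===== PORT B =====
-- the while loop of Source B: first list = starts (i pointer), second list = ends (j pointer)
def bpLoop : List Int → List Int → Int → Int → Int → Int
  | [], _, res, _, _ => res
  | s :: ss, e :: es, res, b, mx =>
    if e ≤ s then bpLoop (s :: ss) es res (b - 1) mx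
    else if mx < b + 1 then bpLoop ss (e :: es) s (b + 1) (b + 1)
    else bpLoop ss (e :: es) res (b + 1) mx
  | s :: ss, [], res, b, mx =>
    if mx < b + 1 then bpLoop ss [] s (b + 1) (b + 1)
    else bpLoop ss [] res (b + 1) mx
termination_by ss es _ _ _ => ss.length + es.length

def brightest_position_alt (lights : List (List Int)) : Int :=
  let starts := PySem.List.sorted
    (lights.map (fun x => PySem.List.pyGetD x 0 0 - PySem.List.pyGetD x 1 0)) (fun v => v) false
  let ends := PySem.List.sorted
    (lights.map (fun x => PySem.List.pyGetD x 0 0 + PySem.List.pyGetD x 1 0 + 1)) (fun v => v) false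
  bpLoop starts ends 0 0 0

-- ===== PRECONDITION & SPEC =====
-- Pre_ excludes inputs where some inner list has fewer than 2 elements: there Python A
-- (and Python B alike) raises IndexError on light[0]/light[1].
def Pre_brightest_position (lights : List (List Int)) : Prop :=
  ∀ light ∈ lights, 2 ≤ light.length
instance (lights : List (List Int)) : Decidable (Pre_brightest_position lights) := by
  unfold Pre_brightest_position; infer_instance

def pvWitness_brightest_position : List (List Int) := [[0, 1], [2, 3], [-1, 0]]

def Spec_brightest_position (lights : List (List Int)) (out : Int) : Prop :=
  out = brightest_position_alt lights
instance (lights : List (List Int)) (out : Int) : Decidable (Spec_brightest_position lights out) := by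
  unfold Spec_brightest_position; infer_instance

-- ===== CLAIM (what is proved, stated in full; the proofs are below) =====
def Claim_equal_brightest_position : Prop :=
  ∀ (lights : List (List Int)), Dom_brightest_position lights →
    Pre_brightest_position lights →
    Spec_brightest_position lights (brightest_position lights)

-- ===== LEMMAS AND PROOFS =====

-- proof-side abbreviations for the two event coordinates of a light
def evS (x : List Int) : Int := PySem.List.pyGetD x 0 0 - PySem.List.pyGetD x 1 0
def evE (x : List Int) : Int := PySem.List.pyGetD x 0 0 + PySem.List.pyGetD x 1 0 + 1

-- the dict-building step of A, and A's dict
def stepD (d : PySem.Dict Int Int) (x : List Int) : PySem.Dict Int Int :=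
  (d.modify (evS x) 0 (· + 1)).modify (evE x) 0 (· - 1)
def daOf (lights : List (List Int)) : PySem.Dict Int Int :=
  lights.foldl stepD PySem.Dict.empty

-- one sweep step on state (res, b, mx) for an event/group (coordinate, delta)
def pvStep (st : Int × Int × Int) (g : Int × Int) : Int × Int × Int :=
  let b := st.2.1 + g.2
  if st.2.2 < b then (g.1, b, b) else (st.1, b, st.2.2)

-- the merged event stream the two-pointer loop walks (ends before starts at a tie)
def pvMerge : List Int → List Int → List (Int × Int)
  | [], _ => []
  | s :: ss, e :: es =>
    if e ≤ s then (e, -1) :: pvMerge (s :: ss) es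
    else (s, 1) :: pvMerge ss (e :: es)
  | s :: ss, [] => (s, 1) :: pvMerge ss []
termination_by ss es => ss.length + es.length

lemma daOf_getD_aux (lights : List (List Int)) :
    ∀ (d : PySem.Dict Int Int) (p : Int),
    (lights.foldl stepD d).getD p 0
      = d.getD p 0 + ((lights.map evS).count p : Int) - ((lights.map evE).count p : Int) := by
  induction lights with
  | nil => intro d p; simp
  | cons x t ih =>
    intro d p
    rw [List.foldl_cons, ih]
    simp only [stepD, PySem.Dict.getD_modify, List.map_cons, List.count_cons]
    split_ifs <;> push_cast <;> simp_all <;> omega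

lemma daOf_getD (lights : List (List Int)) (p : Int) :
    (daOf lights).getD p 0
      = ((lights.map evS).count p : Int) - ((lights.map evE).count p : Int) := by
  rw [daOf, daOf_getD_aux]; simp [PySem.Dict.getD, PySem.Dict.get?, PySem.Dict.empty]

lemma daOf_keys_mem_aux (lights : List (List Int)) :
    ∀ (d : PySem.Dict Int Int) (p : Int),
    p ∈ (lights.foldl stepD d).keys ↔ p ∈ d.keys ∨ p ∈ lights.map evS ∨ p ∈ lights.map evE := by
  induction lights with
  | nil => intro d p; simp
  | cons x t ih =>
    intro d p
    rw [List.foldl_cons, ih]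
    simp only [stepD, PySem.Dict.keys_modify, PySem.Dict.mem_keys_insert, List.map_cons,
      List.mem_cons]
    tauto

lemma daOf_keys_nodup (lights : List (List Int)) : (daOf lights).keys.Nodup := by
  rw [daOf]
  have : ∀ (d : PySem.Dict Int Int), d.keys.Nodup → (lights.foldl stepD d).keys.Nodup := by
    induction lights with
    | nil => intro d h; simpa
    | cons x t ih =>
      intro d h
      rw [List.foldl_cons]
      apply ih
      simp only [stepD, PySem.Dict.keys_modify]
      exact PySem.Dict.nodup_keys_insert _ _ _ (by
        rw [PySem.Dict.keys_modify]; exact PySem.Dict.nodup_keys_insert _ _ _ h)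
  apply this
  simp [PySem.Dict.empty, PySem.Dict.keys]

lemma fold_nonpos (L : List (Int × Int)) :
    ∀ (res b mx : Int), (∀ g ∈ L, g.2 ≤ 0) → b ≤ mx →
      (List.foldl pvStep (res, b, mx) L).1 = res := by
  induction L with
  | nil => intro res b mx _ _; rfl
  | cons g t ih =>
    intro res b mx hL h
    have hg : g.2 ≤ 0 := hL g (List.mem_cons_self ..)
    rw [List.foldl_cons]
    have : pvStep (res, b, mx) g = (res, b + g.2, mx) := by
      simp only [pvStep]; rw [if_neg (by omega)]
    rw [this]
    exact ih res _ mx (fun g hgm => hL g (List.mem_cons_of_mem _ hgm)) (by omega)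

lemma fold_incs (m : Nat) :
    ∀ (res b mx k : Int), b ≤ mx →
      List.foldl pvStep (res, b, mx) (List.replicate m (k, 1))
        = if mx < b + (m : Int) then (k, b + m, b + m) else (res, b + m, mx) := by
  induction m with
  | zero => intro res b mx k h; simp; omega
  | succ n ih =>
    intro res b mx k h
    rw [List.replicate_succ, List.foldl_cons]
    by_cases hc : mx < b + 1
    · have : pvStep (res, b, mx) (k, 1) = (k, b + 1, b + 1) := by
        simp only [pvStep]; rw [if_pos (by omega)]
      rw [this, ih k (b+1) (b+1) k le_rfl]
      push_cast
      split_ifs <;> simp only [Prod.mk.injEq, true_and] <;> omega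
    · have : pvStep (res, b, mx) (k, 1) = (res, b + 1, mx) := by
        simp only [pvStep]; rw [if_neg (by omega)]
      rw [this, ih res (b+1) mx k (by omega)]
      push_cast
      split_ifs <;> simp only [Prod.mk.injEq, true_and, and_true] <;> omega

lemma fold_decs (e : Nat) :
    ∀ (res b mx k : Int), b ≤ mx →
      List.foldl pvStep (res, b, mx) (List.replicate e (k, -1)) = (res, b - e, mx) := by
  induction e with
  | zero => intro res b mx k h; simp
  | succ n ih =>
    intro res b mx k h
    rw [List.replicate_succ, List.foldl_cons]
    have h2 : pvStep (res, b, mx) (k, -1) = (res, b + -1, mx) := by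
      simp only [pvStep]; rw [if_neg (by omega)]
    rw [h2, show b + -1 = b - 1 from by ring, ih res (b-1) mx k (by omega)]
    push_cast
    simp only [Prod.mk.injEq, true_and, and_true]
    omega

lemma group_step (e m : Nat) (res b mx k : Int) (h : b ≤ mx) :
    List.foldl pvStep (res, b, mx) (List.replicate e (k, -1) ++ List.replicate m (k, 1))
      = pvStep (res, b, mx) (k, (m : Int) - e) := by
  rw [List.foldl_append, fold_decs e res b mx k h, fold_incs m res (b - e) mx k (by omega)]
  simp only [pvStep]
  have h1 : b - (e:Int) + m = b + ((m:Int) - e) := by ring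
  rw [h1]

lemma lower_decomp (ss : List Int) (k : Int) :
    ss.Pairwise (· ≤ ·) → (∀ x ∈ ss, k ≤ x) →
    ∃ (m : Nat) (ss' : List Int), ss = List.replicate m k ++ ss' ∧ ss.count k = m ∧
      (∀ x ∈ ss', k < x) ∧ ss'.Pairwise (· ≤ ·) := by
  induction ss with
  | nil => intro _ _; exact ⟨0, [], rfl, rfl, by simp, List.Pairwise.nil⟩
  | cons a t ih =>
    intro hp hm
    rcases List.pairwise_cons.mp hp with ⟨hat, hpt⟩
    by_cases hak : a = k
    · subst hak
      obtain ⟨m, ss', heq, hcnt, hgt, hp'⟩ := ih hpt (fun x hx => hm x (List.mem_cons_of_mem _ hx))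
      refine ⟨m + 1, ss', ?_, ?_, hgt, hp'⟩
      · rw [List.replicate_succ, List.cons_append, heq]
      · rw [List.count_cons_self, hcnt]
    · have hka : k < a := lt_of_le_of_ne (hm a (List.mem_cons_self ..)) (Ne.symm hak)
      refine ⟨0, a :: t, rfl, ?_, ?_, hp⟩
      · rw [List.count_eq_zero]
        intro hkmem
        rcases List.mem_cons.mp hkmem with h1 | h1
        · exact hak h1.symm
        · exact absurd (hat k h1) (by omega)
      · intro x hx
        rcases List.mem_cons.mp hx with h1 | h1
        · omega
        · exact lt_of_lt_of_le hka (hat x h1)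

lemma pvMerge_pop (e : Nat) (k : Int) :
    ∀ (ss es' : List Int), ss ≠ [] → (∀ x ∈ ss, k ≤ x) →
      pvMerge ss (List.replicate e k ++ es')
        = List.replicate e (k, -1) ++ pvMerge ss es' := by
  induction e with
  | zero => intro ss es' _ _; simp
  | succ n ih =>
    intro ss es' hne hm
    match ss with
    | s :: t =>
      rw [List.replicate_succ, List.cons_append, pvMerge,
        if_pos (hm s (List.mem_cons_self ..)), ih (s :: t) es' hne hm,
        List.replicate_succ, List.cons_append]

lemma pvMerge_emit (m : Nat) (k : Int) :
    ∀ (ss' es' : List Int), (∀ x ∈ es', k < x) →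
      pvMerge (List.replicate m k ++ ss') es'
        = List.replicate m (k, 1) ++ pvMerge ss' es' := by
  induction m with
  | zero => intro ss' es' _; simp
  | succ n ih =>
    intro ss' es' hm
    rw [List.replicate_succ, List.cons_append]
    match es' with
    | [] => rw [pvMerge, ih ss' [] (by simp), List.replicate_succ, List.cons_append]
    | e :: t =>
      rw [pvMerge, if_neg (by have := hm e (List.mem_cons_self ..); omega),
        ih ss' (e :: t) hm, List.replicate_succ, List.cons_append]

lemma bpLoop_eq : ∀ (ss es : List Int) (res b mx : Int), b ≤ mx →
    bpLoop ss es res b mx = (List.foldl pvStep (res, b, mx) (pvMerge ss es)).1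
  | [], es, res, b, mx, h => by rw [bpLoop, pvMerge]; rfl
  | s :: ss, e :: es, res, b, mx, h => by
    rw [bpLoop, pvMerge]
    by_cases hc : e ≤ s
    · rw [if_pos hc, if_pos hc, List.foldl_cons,
        show pvStep (res, b, mx) (e, -1) = (res, b - 1, mx) by
          simp only [pvStep]; rw [if_neg (by omega)]; simp only [Prod.mk.injEq, true_and, and_true]; omega]
      exact bpLoop_eq (s :: ss) es res (b - 1) mx (by omega)
    · rw [if_neg hc, if_neg hc, List.foldl_cons]
      by_cases h2 : mx < b + 1
      · rw [if_pos h2,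
          show pvStep (res, b, mx) (s, 1) = (s, b + 1, b + 1) by
            simp only [pvStep]; rw [if_pos (by omega)]]
        exact bpLoop_eq ss (e :: es) s (b + 1) (b + 1) le_rfl
      · rw [if_neg h2,
          show pvStep (res, b, mx) (s, 1) = (res, b + 1, mx) by
            simp only [pvStep]; rw [if_neg (by omega)]]
        exact bpLoop_eq ss (e :: es) res (b + 1) mx (by omega)
  | s :: ss, [], res, b, mx, h => by
    rw [bpLoop, pvMerge, List.foldl_cons]
    by_cases h2 : mx < b + 1
    · rw [if_pos h2,
        show pvStep (res, b, mx) (s, 1) = (s, b + 1, b + 1) by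
          simp only [pvStep]; rw [if_pos (by omega)]]
      exact bpLoop_eq ss [] s (b + 1) (b + 1) le_rfl
    · rw [if_neg h2,
        show pvStep (res, b, mx) (s, 1) = (res, b + 1, mx) by
          simp only [pvStep]; rw [if_neg (by omega)]]
      exact bpLoop_eq ss [] res (b + 1) mx (by omega)
termination_by ss es _ _ _ _ => ss.length + es.length

lemma pvStep_inv (res b mx : Int) (g : Int × Int) (h : b ≤ mx) :
    (pvStep (res, b, mx) g).2.1 ≤ (pvStep (res, b, mx) g).2.2 := by
  simp only [pvStep]
  split_ifs <;> simp only [] <;> omega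

lemma merge_grouped : ∀ (K ss es : List Int) (res b mx : Int),
    K.Pairwise (· < ·) → ss.Pairwise (· ≤ ·) → es.Pairwise (· ≤ ·) →
    (∀ x ∈ ss, x ∈ K) → (∀ x ∈ es, x ∈ K) → b ≤ mx →
    (List.foldl pvStep (res, b, mx) (pvMerge ss es)).1
      = (List.foldl pvStep (res, b, mx)
          (K.map (fun p => (p, (ss.count p : Int) - (es.count p : Int))))).1 := by
  intro K
  induction K with
  | nil =>
    intro ss es res b mx _ _ _ hms hme _
    have hss : ss = [] := List.eq_nil_iff_forall_not_mem.mpr fun x hx => by simpa using hms x hx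
    subst hss
    rw [pvMerge, List.map_nil]
  | cons k K' ih =>
    intro ss es res b mx hK hps hpe hms hme hbm
    rcases List.pairwise_cons.mp hK with ⟨hkK', hK'⟩
    by_cases hssnil : ss = []
    · subst hssnil
      rw [pvMerge, List.foldl_nil]
      rw [fold_nonpos _ res b mx ?_ hbm]
      intro g hg
      rcases List.mem_map.mp hg with ⟨p, _, rfl⟩
      simp only [List.count_nil]
      push_cast
      omega
    · have hsge : ∀ x ∈ ss, k ≤ x := fun x hx => by
        rcases List.mem_cons.mp (hms x hx) with h | h
        · omega
        · exact le_of_lt (hkK' x h)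
      have hege : ∀ x ∈ es, k ≤ x := fun x hx => by
        rcases List.mem_cons.mp (hme x hx) with h | h
        · omega
        · exact le_of_lt (hkK' x h)
      obtain ⟨m, ss', hseq, hscnt, hsgt, hps'⟩ := lower_decomp ss k hps hsge
      obtain ⟨e, es', heeq, hecnt, hegt, hpe'⟩ := lower_decomp es k hpe hege
      have hinter : pvMerge ss es
          = (List.replicate e (k, -1) ++ List.replicate m (k, 1)) ++ pvMerge ss' es' := by
        conv_lhs => rw [heeq]
        rw [pvMerge_pop e k ss es' hssnil hsge]
        conv_lhs => rw [hseq]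
        rw [pvMerge_emit m k ss' es' hegt, List.append_assoc]
      rw [hinter, List.foldl_append, group_step e m res b mx k hbm, List.map_cons,
        List.foldl_cons, hscnt, hecnt]
      rcases hst : pvStep (res, b, mx) (k, (m : Int) - e) with ⟨res', b', mx'⟩
      have hinv : b' ≤ mx' := by
        have := pvStep_inv res b mx (k, (m : Int) - e) hbm
        rw [hst] at this
        exact this
      have hmapeq : K'.map (fun p => (p, (ss.count p : Int) - es.count p))
          = K'.map (fun p => (p, (ss'.count p : Int) - es'.count p)) := by
        apply List.map_congr_left
        intro p hp
        have hkp : k < p := hkK' p hp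
        rw [hseq, heeq]
        simp [List.count_append, List.count_replicate, show ¬ k = p by omega]
      rw [hmapeq]
      exact ih ss' es' res' b' mx' hK' hps' hpe'
        (fun x hx => by
          have hxk : k < x := hsgt x hx
          have : x ∈ k :: K' := hms x (by rw [hseq]; exact List.mem_append_right _ hx)
          rcases List.mem_cons.mp this with h | h
          · omega
          · exact h)
        (fun x hx => by
          have hxk : k < x := hegt x hx
          have : x ∈ k :: K' := hme x (by rw [heeq]; exact List.mem_append_right _ hx)
          rcases List.mem_cons.mp this with h | h
          · omega
          · exact h)
        hinv

lemma daOf_keys_mem (lights : List (List Int)) (p : Int) :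
    p ∈ (daOf lights).keys ↔ p ∈ lights.map evS ∨ p ∈ lights.map evE := by
  rw [daOf, daOf_keys_mem_aux]
  simp [PySem.Dict.empty, PySem.Dict.keys]

lemma A_eval (lights : List (List Int)) :
    brightest_position lights
      = (List.foldl pvStep (0, 0, 0)
          ((PySem.List.sorted (daOf lights).keys (fun p => p) false).map
            (fun p => (p, (daOf lights).getD p 0)))).1 := by
  rw [List.foldl_map]
  rfl

lemma main_eq (lights : List (List Int)) :
    brightest_position lights = brightest_position_alt lights := by
  have hSp : (PySem.List.sorted (lights.map evS) (fun v => v) false).Pairwise (· ≤ ·) :=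
    PySem.List.sorted_pairwise (lights.map evS) (fun v => v)
  have hEp : (PySem.List.sorted (lights.map evE) (fun v => v) false).Pairwise (· ≤ ·) :=
    PySem.List.sorted_pairwise (lights.map evE) (fun v => v)
  have hKperm := PySem.List.sorted_perm (daOf lights).keys (fun p => p) false
  have hKnd : (PySem.List.sorted (daOf lights).keys (fun p => p) false).Nodup :=
    hKperm.nodup_iff.mpr (daOf_keys_nodup lights)
  have hKle : (PySem.List.sorted (daOf lights).keys (fun p => p) false).Pairwise (· ≤ ·) :=
    PySem.List.sorted_pairwise (daOf lights).keys (fun p => p)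
  have hKpair : (PySem.List.sorted (daOf lights).keys (fun p => p) false).Pairwise (· < ·) :=
    (hKle.and hKnd).imp fun h => lt_of_le_of_ne h.1 h.2
  have hmemS : ∀ x ∈ PySem.List.sorted (lights.map evS) (fun v => v) false,
      x ∈ PySem.List.sorted (daOf lights).keys (fun p => p) false := fun x hx => by
    rw [PySem.List.mem_sorted] at hx ⊢
    rw [daOf_keys_mem]
    exact Or.inl hx
  have hmemE : ∀ x ∈ PySem.List.sorted (lights.map evE) (fun v => v) false,
      x ∈ PySem.List.sorted (daOf lights).keys (fun p => p) false := fun x hx => by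
    rw [PySem.List.mem_sorted] at hx ⊢
    rw [daOf_keys_mem]
    exact Or.inr hx
  have hpt : ∀ p : Int, ((p, (daOf lights).getD p 0) : Int × Int)
      = (p, ((PySem.List.sorted (lights.map evS) (fun v => v) false).count p : Int)
          - ((PySem.List.sorted (lights.map evE) (fun v => v) false).count p : Int)) := fun p => by
    rw [daOf_getD,
      (PySem.List.sorted_perm (lights.map evS) (fun v => v) false).count_eq,
      (PySem.List.sorted_perm (lights.map evE) (fun v => v) false).count_eq]
  rw [A_eval]
  rw [List.map_congr_left (l := PySem.List.sorted (daOf lights).keys (fun p => p) false)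
      (fun p _ => hpt p)]
  rw [← merge_grouped _ _ _ 0 0 0 hKpair hSp hEp hmemS hmemE le_rfl]
  rw [← bpLoop_eq _ _ 0 0 0 le_rfl]
  rfl

-- ===== VERDICT (by name: the statement is the Claim_ definition above) =====
theorem brightest_position_spec : Claim_equal_brightest_position := by
  intro lights _ _
  unfold Spec_brightest_position
  exact main_eq lights
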